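-- pv_equiv track=rewrite | github.com/jonorga/667_HW3 | hw3.py | q12
-- ===== SOURCE A (Python) =====
-- def q12(file_len, working_file):
-- 	i = 0
-- 	l_val = 0
-- 	l_pos = 0
-- 	l_neg = 0
-- 	while i < file_len:
-- 		temp = working_file["Date"].get(i)
-- 		if temp.split("/")[2] == "20":
-- 			i = file_len
-- 		else:
-- 			l_val += 1
-- 		if working_file["True Label"].get(i) == "+":
-- 			l_pos += 1
-- 		elif working_file["True Label"].get(i) == "-":
-- 			l_neg += 1
-- 		i += 1
-- 	return l_pos, l_val
-- ===== SOURCE B (Python) =====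
-- def _year(working_file, i):
--     return working_file["Date"].get(i).split("/")[2]
--
-- def _lab(working_file, i):
--     return working_file["True Label"].get(i)
--
-- def q12(file_len, working_file):
--     stop = 0
--     while stop < file_len:
--         if _year(working_file, stop) == "20":
--             break
--         stop += 1
--     l_pos = 0
--     for j in range(stop):
--         if _lab(working_file, j) == "+":
--             l_pos += 1
--     return l_pos, stop
-- ===== Notes on version B (the rewrite author's own statement) =====
-- stated objective: alternative
-- what changed: B replaces A's single stateful while-loop (with the i=file_len break trick and l_val/l_neg accumulators) by two separate passes: first find the break index `stop`, then count '+' labels over range(stop); the dead l_neg counter and the out-of-range label read at index file_len disappear.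
-- intended difference: When the date scan breaks on a year-'20' row and the 'True Label' dict happens to contain the out-of-range key file_len mapped to '+', A reads that entry (because it sets i=file_len before the label test) and returns an l_pos one too large; B counts only labels of rows before the break, which is the intended count. — e.g. on q12(1, [("Date", [(0, "1/1/20")]), ("True Label", [(1, "+")])]): A returns (1, 0), B returns (0, 0)
import Mathlib
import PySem

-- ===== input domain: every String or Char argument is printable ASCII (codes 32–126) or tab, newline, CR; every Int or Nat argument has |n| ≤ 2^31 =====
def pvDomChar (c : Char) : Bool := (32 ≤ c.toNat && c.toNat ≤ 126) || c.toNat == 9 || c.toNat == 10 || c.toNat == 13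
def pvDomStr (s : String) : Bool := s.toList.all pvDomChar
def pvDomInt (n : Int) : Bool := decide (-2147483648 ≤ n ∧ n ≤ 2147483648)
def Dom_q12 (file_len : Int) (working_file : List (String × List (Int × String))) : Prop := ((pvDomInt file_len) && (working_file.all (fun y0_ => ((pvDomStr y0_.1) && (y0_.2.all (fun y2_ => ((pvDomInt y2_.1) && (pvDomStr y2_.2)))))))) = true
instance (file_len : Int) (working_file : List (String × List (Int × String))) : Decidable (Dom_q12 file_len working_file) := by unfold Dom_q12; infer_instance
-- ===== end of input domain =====

-- B is an alternative decomposition of A: find the break index first, then count '+' labels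
-- before it; equivalence is proved outside D_q12 (A's out-of-range label read at the break).

-- ===== PORT A =====
-- A's while-loop; fuel = file_len.toNat bounds the iteration count (i grows each pass).
-- The (0, 0) arms are the branches where the Python raises (excluded by Pre_q12).
def q12Loop (fl : Int) (wf : List (String × List (Int × String))) :
    Nat → Int → Int → Int → Int → Int × Int
  | 0, _, l_val, l_pos, _ => (l_pos, l_val)
  | n + 1, i, l_val, l_pos, l_neg =>
    if i < fl then
      match PySem.Dict.get? (PySem.Dict.mk wf) "Date" with
      | none => (0, 0)
      | some dates =>
        match PySem.Dict.get? (PySem.Dict.mk dates) i with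
        | none => (0, 0)
        | some temp =>
          match PySem.List.pyGet? ((PySem.Str.split? temp "/").getD []) 2 with
          | none => (0, 0)
          | some y =>
            let i1 := if y == "20" then fl else i
            let l_val1 := if y == "20" then l_val else l_val + 1
            match PySem.Dict.get? (PySem.Dict.mk wf) "True Label" with
            | none => (0, 0)
            | some labels =>
              let lab := PySem.Dict.get? (PySem.Dict.mk labels) i1
              let l_pos1 := if lab == some "+" then l_pos + 1 else l_pos
              let l_neg1 := if lab == some "+" then l_neg
                            else if lab == some "-" then l_neg + 1 else l_neg
              q12Loop fl wf n (i1 + 1) l_val1 l_pos1 l_neg1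
    else (l_pos, l_val)

def q12 (file_len : Int) (working_file : List (String × List (Int × String))) : Int × Int :=
  q12Loop file_len working_file file_len.toNat 0 0 0 0

-- ===== PORT B =====
-- Source B's helper _year(working_file, i) (none = the chain raises; excluded by Pre_q12)
def q12AltYear? (working_file : List (String × List (Int × String))) (i : Int) : Option String :=
  (PySem.Dict.get? (PySem.Dict.mk working_file) "Date").bind fun d =>
    (PySem.Dict.get? (PySem.Dict.mk d) i).bind fun s =>
      PySem.List.pyGet? ((PySem.Str.split? s "/").getD []) 2

-- Source B's helper _lab(working_file, i)
def q12AltLab? (working_file : List (String × List (Int × String))) (i : Int) : Option String :=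
  (PySem.Dict.get? (PySem.Dict.mk working_file) "True Label").bind fun d =>
    PySem.Dict.get? (PySem.Dict.mk d) i

-- first pass of Source B: while stop < file_len: if _year(wf, stop) == "20": break; stop += 1
def q12AltStop (fl : Int) (wf : List (String × List (Int × String))) :
    Nat → Int → Option Int
  | 0, stop => some stop
  | n + 1, stop =>
    if stop < fl then
      match q12AltYear? wf stop with
      | none => none
      | some y => if y == "20" then some stop else q12AltStop fl wf n (stop + 1)
    else some stop

def q12_alt (file_len : Int) (working_file : List (String × List (Int × String))) : Int × Int :=
  match q12AltStop file_len working_file file_len.toNat 0 with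
  | none => (0, 0)   -- Source B raised in the first pass (outside Pre_q12)
  | some stop =>
    -- second pass: for j in range(stop): if _lab(wf, j) == "+": l_pos += 1
    ((PySem.List.pyRange 0 stop 1).foldl
        (fun acc j => if q12AltLab? working_file j == some "+" then acc + 1 else acc) 0,
     stop)

-- ===== PRECONDITION & SPEC =====
-- spec-side helper: the year part (third '/'-separated field) of row i of the "Date"
-- column; a missing column or cell yields the empty string, which has no third field
def pvYear (working_file : List (String × List (Int × String))) (i : Int) :
    Option (List Char) :=
  (PySem.Chars.splitOn ((((working_file.lookup "Date").getD []).lookup i).getD "").toList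
      ['/'])[2]?

-- Pre_q12: exactly the inputs where A returns normally — when the loop runs (file_len > 0),
-- "True Label" must be a present key, and every date cell the scan reaches sequentially
-- (i.e. as long as no earlier cell had no year part or year "20") must yield a year part.
-- (The quantifier is also capped by the "Date" row size: a run of valid cells needs that
-- many distinct keys, so the cap excludes nothing and keeps the condition fast to decide.)
def Pre_q12 (file_len : Int) (working_file : List (String × List (Int × String))) : Prop :=
  0 < file_len →
    ((working_file.lookup "True Label").isSome = true ∧
     ∀ i : Nat,
       i < min file_len.toNat (((working_file.lookup "Date").getD []).length + 1) →
       (∀ j : Nat, j < i → (pvYear working_file (j : Int)).isSome = true ∧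
                           pvYear working_file (j : Int) ≠ some ['2', '0']) →
       (pvYear working_file (i : Int)).isSome = true)

instance (file_len : Int) (working_file : List (String × List (Int × String))) : Decidable (Pre_q12 file_len working_file) := by unfold Pre_q12; infer_instance

def pvWitness_q12 : Int × (List (String × List (Int × String))) :=
  (2, [("Date", [(0, "1/1/19"), (1, "2/2/20")]), ("True Label", [(0, "+"), (1, "-")])])

-- When some date row before file_len has year "20" (so the scan breaks) and "True Label"
-- maps the out-of-range key file_len to "+", A counts that label (it sets i = file_len
-- before the label test) and returns l_pos one too large; B counts only labels of rows
-- before the break, the intended count.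
def D_q12 (file_len : Int) (working_file : List (String × List (Int × String))) : Prop :=
  (∃ p ∈ (working_file.lookup "Date").getD [],
      0 ≤ p.1 ∧ p.1 < file_len ∧ pvYear working_file p.1 = some ['2', '0']) ∧
  ((working_file.lookup "True Label").getD []).lookup file_len = some "+"

instance (file_len : Int) (working_file : List (String × List (Int × String))) : Decidable (D_q12 file_len working_file) := by unfold D_q12; infer_instance

def Spec_q12 (file_len : Int) (working_file : List (String × List (Int × String))) (out : Int × Int) : Prop := ¬ D_q12 file_len working_file → out = q12_alt file_len working_file
instance (file_len : Int) (working_file : List (String × List (Int × String))) (out : Int × Int) : Decidable (Spec_q12 file_len working_file out) := by unfold Spec_q12; infer_instance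

def pvDiffWitness_q12 : Int × (List (String × List (Int × String))) :=
  (1, [("Date", [(0, "1/1/20")]), ("True Label", [(1, "+")])])

def pvDiffWitnessOut_q12 : (Int × Int) × (Int × Int) := ((1, 0), (0, 0))

-- ===== CLAIM (what is proved, stated in full; the proofs are below) =====
def Claim_unchanged_q12 : Prop := ∀ (file_len : Int) (working_file : List (String × List (Int × String))), Dom_q12 file_len working_file → Pre_q12 file_len working_file → Spec_q12 file_len working_file (q12 file_len working_file)

def Claim_changed_q12 : Prop := Dom_q12 (pvDiffWitness_q12.1) (pvDiffWitness_q12.2) ∧ Pre_q12 (pvDiffWitness_q12.1) (pvDiffWitness_q12.2) ∧ D_q12 (pvDiffWitness_q12.1) (pvDiffWitness_q12.2) ∧ q12 (pvDiffWitness_q12.1) (pvDiffWitness_q12.2) = pvDiffWitnessOut_q12.1 ∧ q12_alt (pvDiffWitness_q12.1) (pvDiffWitness_q12.2) = pvDiffWitnessOut_q12.2 ∧ pvDiffWitnessOut_q12.1 ≠ pvDiffWitnessOut_q12.2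

def Claim_exact_q12 : Prop := ∀ (file_len : Int) (working_file : List (String × List (Int × String))), Dom_q12 file_len working_file → Pre_q12 file_len working_file → D_q12 file_len working_file → q12 file_len working_file ≠ q12_alt file_len working_file

-- ===== LEMMAS AND PROOFS =====

-- bridges between the spec-side lookup/splitOn phrasing and Source B's helpers
lemma lookup_eq_get? {ν : Type} {κ : Type} [DecidableEq κ] (l : List (κ × ν)) (k : κ) :
    List.lookup k l = PySem.Dict.get? (PySem.Dict.mk l) k := by
  induction l with
  | nil => simp [List.lookup, PySem.Dict.get?]
  | cons p t ihl =>
    obtain ⟨a, b⟩ := p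
    by_cases h : k = a
    · subst h; simp [List.lookup, PySem.Dict.get?]
    · have h1 : (k == a) = false := beq_false_of_ne h
      have h2 : (a == k) = false := beq_false_of_ne (Ne.symm h)
      simp [List.lookup, PySem.Dict.get?, List.find?, h1, h2, ihl]

lemma pvLab_eq (wf : List (String × List (Int × String))) (i : Int) :
    ((wf.lookup "True Label").getD []).lookup i = q12AltLab? wf i := by
  rw [q12AltLab?]
  cases hL : PySem.Dict.get? (PySem.Dict.mk wf) "True Label" with
  | none =>
    have hL' : wf.lookup "True Label" = none := by rw [lookup_eq_get?, hL]
    rw [hL']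
    simp [List.lookup]
  | some labels =>
    have hL' : wf.lookup "True Label" = some labels := by rw [lookup_eq_get?, hL]
    rw [hL']
    simp [lookup_eq_get?]

lemma year_bridge (s : String) :
    ((PySem.Chars.splitOn s.toList ['/'])[2]?).map String.ofList
      = PySem.List.pyGet? ((PySem.Str.split? s "/").getD []) 2 := by
  simp [PySem.Str.split?, PySem.Chars.split?, PySem.List.pyGet?_of_nonneg,
    List.getElem?_map]

lemma year_map (wf : List (String × List (Int × String))) (i : Int) :
    (pvYear wf i).map String.ofList = q12AltYear? wf i := by
  have hempty : ((PySem.Chars.splitOn ("" : String).toList ['/'])[2]?).map String.ofList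
      = none := by decide
  rw [pvYear, q12AltYear?]
  cases hD : PySem.Dict.get? (PySem.Dict.mk wf) "Date" with
  | none =>
    have hD' : wf.lookup "Date" = none := by rw [lookup_eq_get?, hD]
    rw [hD']
    simpa [List.lookup] using hempty
  | some dates =>
    have hD' : wf.lookup "Date" = some dates := by rw [lookup_eq_get?, hD]
    rw [hD']
    cases hT : PySem.Dict.get? (PySem.Dict.mk dates) i with
    | none =>
      have hT' : dates.lookup i = none := by rw [lookup_eq_get?, hT]
      simpa [hT', hT] using hempty
    | some s =>
      have hT' : dates.lookup i = some s := by rw [lookup_eq_get?, hT]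
      simpa [hT', hT] using year_bridge s

lemma year_isSome (wf : List (String × List (Int × String))) (i : Int) :
    (q12AltYear? wf i).isSome = (pvYear wf i).isSome := by
  rw [← year_map]
  cases pvYear wf i <;> simp

lemma year_eq20 (wf : List (String × List (Int × String))) (i : Int) :
    q12AltYear? wf i = some "20" ↔ pvYear wf i = some ['2', '0'] := by
  rw [← year_map]
  cases h : pvYear wf i with
  | none => simp
  | some l =>
    simp only [Option.map_some, Option.some.injEq]
    constructor
    · intro hh
      have := congrArg String.toList hh
      simpa using this
    · intro hh; subst hh; rfl

-- a valid year at j forces a "Date" pair with key j (so valid runs are bounded by the row)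
lemma year_some_key (wf : List (String × List (Int × String))) (j : Int)
    (h : (q12AltYear? wf j).isSome = true) :
    ∃ p ∈ (wf.lookup "Date").getD [], p.1 = j := by
  rw [q12AltYear?] at h
  cases hD : PySem.Dict.get? (PySem.Dict.mk wf) "Date" with
  | none => rw [hD] at h; simp at h
  | some dates =>
    rw [hD] at h
    simp only [Option.bind_some] at h
    cases hT : PySem.Dict.get? (PySem.Dict.mk dates) j with
    | none => rw [hT] at h; simp at h
    | some s =>
      have hrow : (wf.lookup "Date").getD [] = dates := by
        rw [lookup_eq_get?, hD]; rfl
      rw [hrow]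
      cases hF : List.find? (fun p => p.1 == j) dates with
      | none => rw [PySem.Dict.get?] at hT; rw [hF] at hT; simp at hT
      | some q =>
        refine ⟨q, List.mem_of_find?_eq_some hF, ?_⟩
        have := List.find?_some hF
        simpa using this

-- reference scan: (stop index, '+'-count before stop, whether the loop broke on a "20" row)
def pvScan (fl : Int) (wf : List (String × List (Int × String))) :
    Nat → Nat → Nat × Int × Bool
  | 0, k => (k, 0, false)
  | n + 1, k =>
    if (k : Int) < fl then
      match q12AltYear? wf (k : Int) with
      | none => (k, 0, false)
      | some y =>
        if y == "20" then (k, 0, true)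
        else
          let r := pvScan fl wf n (k + 1)
          (r.1, (if q12AltLab? wf (k : Int) == some "+" then 1 else 0) + r.2.1, r.2.2)
    else (k, 0, false)

-- the history hypothesis carried along the scan
def pvHist (wf : List (String × List (Int × String))) (k : Nat) : Prop :=
  ∀ j : Nat, j < k → (q12AltYear? wf (j : Int)).isSome = true ∧
             q12AltYear? wf (j : Int) ≠ some "20"

-- a history of valid years up to k needs k distinct keys in the "Date" row
lemma hist_le_len (wf : List (String × List (Int × String))) (k : Nat)
    (hist : pvHist wf k) : k ≤ ((wf.lookup "Date").getD []).length := by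
  have hsub : (List.range k).map (fun n => ((n : Nat) : Int)) ⊆
      ((wf.lookup "Date").getD []).map Prod.fst := by
    intro x hx
    simp only [List.mem_map, List.mem_range] at hx
    obtain ⟨j, hj, rfl⟩ := hx
    obtain ⟨p, hpmem, hpk⟩ := year_some_key wf (j : Int) (hist j hj).1
    exact List.mem_map.mpr ⟨p, hpmem, hpk⟩
  have hnd : ((List.range k).map (fun n => ((n : Nat) : Int))).Nodup :=
    List.Nodup.map (fun a b h => by exact_mod_cast h) List.nodup_range
  have hle := (List.Nodup.subperm hnd hsub).length_le
  simpa using hle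

-- the Pre_q12 data, transported to Source B's helpers
lemma pre_label (fl : Int) (wf : List (String × List (Int × String)))
    (hPre : Pre_q12 fl wf) (hpos : (0 : Int) < fl) :
    (PySem.Dict.get? (PySem.Dict.mk wf) "True Label").isSome = true := by
  have h := (hPre hpos).1
  rwa [lookup_eq_get?] at h

lemma pre_year (fl : Int) (wf : List (String × List (Int × String)))
    (hPre : Pre_q12 fl wf) (hpos : (0 : Int) < fl) (k : Nat) (hk : k < fl.toNat)
    (hist : pvHist wf k) : (q12AltYear? wf (k : Int)).isSome = true := by
  rw [year_isSome]
  have hlen := hist_le_len wf k hist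
  refine (hPre hpos).2 k (by omega) (fun j hj => ?_)
  obtain ⟨h1, h2⟩ := hist j hj
  rw [year_isSome] at h1
  exact ⟨h1, fun hc => h2 ((year_eq20 wf (j : Int)).mpr hc)⟩

lemma q12Loop_done (fl : Int) (wf : List (String × List (Int × String))) (n : Nat)
    (i l_val l_pos l_neg : Int) (h : ¬ i < fl) :
    q12Loop fl wf n i l_val l_pos l_neg = (l_pos, l_val) := by
  cases n <;> simp [q12Loop, h]

lemma rc_succ (wf : List (String × List (Int × String))) (k : Nat) :
    (PySem.List.pyRange 0 ((k : Int) + 1) 1).foldl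
        (fun (acc : Int) j => if q12AltLab? wf j == some "+" then acc + 1 else acc) 0 =
    (PySem.List.pyRange 0 (k : Int) 1).foldl
        (fun (acc : Int) j => if q12AltLab? wf j == some "+" then acc + 1 else acc) 0
      + (if q12AltLab? wf (k : Int) == some "+" then 1 else 0) := by
  rw [PySem.List.pyRange_one_succ_right (by positivity), List.foldl_append]
  simp only [List.foldl_cons, List.foldl_nil]
  split <;> omega

lemma q12Loop_eq_scan (fl : Int) (wf : List (String × List (Int × String)))
    (hPre : Pre_q12 fl wf) :
    ∀ (n k : Nat) (lp ln : Int), fl.toNat ≤ k + n → pvHist wf k →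
      q12Loop fl wf n (k : Int) (k : Int) lp ln =
        (lp + (pvScan fl wf n k).2.1 +
           (if (pvScan fl wf n k).2.2 && (q12AltLab? wf fl == some "+") then 1 else 0),
         ((pvScan fl wf n k).1 : Int)) := by
  intro n
  induction n with
  | zero =>
    intro k lp ln hfuel hist
    simp [q12Loop, pvScan]
  | succ n ih =>
    intro k lp ln hfuel hist
    by_cases hk : (k : Int) < fl
    · have hk' : k < fl.toNat := by omega
      have hpos : (0 : Int) < fl := by omega
      have hLab := pre_label fl wf hPre hpos
      have hOk := pre_year fl wf hPre hpos k hk' hist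
      cases hD : PySem.Dict.get? (PySem.Dict.mk wf) "Date" with
      | none => rw [q12AltYear?, hD] at hOk; simp at hOk
      | some dates =>
        cases hT : PySem.Dict.get? (PySem.Dict.mk dates) (k : Int) with
        | none => rw [q12AltYear?, hD] at hOk; simp [hT] at hOk
        | some temp =>
          cases hY2 : PySem.List.pyGet? ((PySem.Str.split? temp "/").getD []) 2 with
          | none => rw [q12AltYear?, hD] at hOk; simp [hT, hY2] at hOk
          | some y =>
            have hYear : q12AltYear? wf (k : Int) = some y := by
              rw [q12AltYear?, hD]; simp [hT, hY2]
            cases hL : PySem.Dict.get? (PySem.Dict.mk wf) "True Label" with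
            | none => rw [hL] at hLab; simp at hLab
            | some labels =>
              have hLabEq : ∀ i : Int,
                  q12AltLab? wf i = PySem.Dict.get? (PySem.Dict.mk labels) i := by
                intro i; rw [q12AltLab?, hL]; rfl
              by_cases h20 : (y == "20") = true
              · simp only [q12Loop, pvScan, hk, if_pos, hD, hT, hY2, hYear, hL, h20]
                rw [q12Loop_done fl wf n (fl + 1) _ _ _ (by omega)]
                rw [hLabEq fl]
                cases hpm : (PySem.Dict.get? (PySem.Dict.mk labels) fl == some "+") <;>
                  simp [hpm]
              · simp only [q12Loop, pvScan, hk, if_pos, hD, hT, hY2, hYear, hL, h20,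
                  Bool.false_eq_true, if_false]
                have hcast : (k : Int) + 1 = ((k + 1 : Nat) : Int) := by push_cast; ring
                have hist' : pvHist wf (k + 1) := by
                  intro j hj
                  rcases Nat.lt_succ_iff_lt_or_eq.mp hj with hj' | rfl
                  · exact hist j hj'
                  · have hy20 : y ≠ "20" := by intro h; subst h; simp at h20
                    exact ⟨by rw [hYear]; rfl,
                      by rw [hYear]; exact fun hcon => hy20 (Option.some.inj hcon)⟩
                rw [hcast]
                rw [ih (k + 1)
                  (if PySem.Dict.get? (PySem.Dict.mk labels) (k : Int) == some "+" then lp + 1 else lp)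
                  _ (by omega) hist']
                rw [← hLabEq]
                cases hpm : (q12AltLab? wf (k : Int) == some "+") <;>
                  simp only [hpm, if_true, if_false, Bool.false_eq_true] <;>
                  refine Prod.ext ?_ rfl <;> simp <;> ring
    · rw [q12Loop_done fl wf (n + 1) _ _ _ _ hk]
      simp [pvScan, hk]

lemma q12AltStop_eq_scan (fl : Int) (wf : List (String × List (Int × String)))
    (hPre : Pre_q12 fl wf) :
    ∀ (n k : Nat), fl.toNat ≤ k + n → pvHist wf k →
      q12AltStop fl wf n (k : Int) = some (((pvScan fl wf n k).1 : Nat) : Int) := by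
  intro n
  induction n with
  | zero => intro k hfuel hist; simp [q12AltStop, pvScan]
  | succ n ih =>
    intro k hfuel hist
    by_cases hk : (k : Int) < fl
    · have hk' : k < fl.toNat := by omega
      have hpos : (0 : Int) < fl := by omega
      have hOk := pre_year fl wf hPre hpos k hk' hist
      cases hY : q12AltYear? wf (k : Int) with
      | none => rw [hY] at hOk; simp at hOk
      | some y =>
        by_cases h20 : (y == "20") = true
        · simp [q12AltStop, pvScan, hk, hY, h20]
        · simp only [q12AltStop, pvScan, hk, if_pos, hY, h20, Bool.false_eq_true, if_false]
          have hcast : (k : Int) + 1 = ((k + 1 : Nat) : Int) := by push_cast; ring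
          have hist' : pvHist wf (k + 1) := by
            intro j hj
            rcases Nat.lt_succ_iff_lt_or_eq.mp hj with hj' | rfl
            · exact hist j hj'
            · have hy20 : y ≠ "20" := by intro h; subst h; simp at h20
              exact ⟨by rw [hY]; rfl,
                by rw [hY]; exact fun hcon => hy20 (Option.some.inj hcon)⟩
          rw [hcast, ih (k + 1) (by omega) hist']
    · simp [q12AltStop, pvScan, hk]

lemma pvScan_count (fl : Int) (wf : List (String × List (Int × String))) :
    ∀ (n k : Nat),
      (PySem.List.pyRange 0 (k : Int) 1).foldl
          (fun (acc : Int) j => if q12AltLab? wf j == some "+" then acc + 1 else acc) 0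
        + (pvScan fl wf n k).2.1 =
      (PySem.List.pyRange 0 ((pvScan fl wf n k).1 : Int) 1).foldl
          (fun (acc : Int) j => if q12AltLab? wf j == some "+" then acc + 1 else acc) 0 := by
  intro n
  induction n with
  | zero => intro k; simp [pvScan]
  | succ n ih =>
    intro k
    by_cases hk : (k : Int) < fl
    · cases hY : q12AltYear? wf (k : Int) with
      | none => simp [pvScan, hk, hY]
      | some y =>
        by_cases h20 : (y == "20") = true
        · simp [pvScan, hk, hY, h20]
        · simp only [pvScan, hk, if_pos, hY, h20, Bool.false_eq_true, if_false]
          have h := ih (k + 1)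
          have hstep := rc_succ wf k
          rw [← Nat.cast_add_one] at hstep
          rw [← h, hstep]
          ring
    · simp [pvScan, hk]

lemma pvScan_brk (fl : Int) (wf : List (String × List (Int × String))) :
    ∀ (n k : Nat), pvHist wf k → (pvScan fl wf n k).2.2 = true →
      ∃ i : Nat, i < fl.toNat ∧ q12AltYear? wf (i : Int) = some "20" := by
  intro n
  induction n with
  | zero => intro k hist hbrk; simp [pvScan] at hbrk
  | succ n ih =>
    intro k hist hbrk
    by_cases hk : (k : Int) < fl
    · cases hY : q12AltYear? wf (k : Int) with
      | none => simp [pvScan, hk, hY] at hbrk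
      | some y =>
        by_cases h20 : (y == "20") = true
        · refine ⟨k, by omega, ?_⟩
          rw [hY]
          have : y = "20" := by simpa using h20
          rw [this]
        · simp only [pvScan, hk, if_pos, hY, h20, Bool.false_eq_true, if_false] at hbrk
          have hist' : pvHist wf (k + 1) := by
            intro j hj
            rcases Nat.lt_succ_iff_lt_or_eq.mp hj with hj' | rfl
            · exact hist j hj'
            · have hy20 : y ≠ "20" := by intro h; subst h; simp at h20
              exact ⟨by rw [hY]; rfl,
                by rw [hY]; exact fun hcon => hy20 (Option.some.inj hcon)⟩
          exact ih (k + 1) hist' hbrk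
    · simp [pvScan, hk] at hbrk

lemma pvScan_brk_of_year (fl : Int) (wf : List (String × List (Int × String)))
    (hPre : Pre_q12 fl wf) :
    ∀ (n k i : Nat), fl.toNat ≤ k + n → k ≤ i → i < fl.toNat → pvHist wf i →
      q12AltYear? wf (i : Int) = some "20" → (pvScan fl wf n k).2.2 = true := by
  intro n
  induction n with
  | zero => intro k i hfuel hki hi hist hy; omega
  | succ n ih =>
    intro k i hfuel hki hi hist hy
    have hk : (k : Int) < fl := by omega
    rcases Nat.eq_or_lt_of_le hki with rfl | hlt
    · simp [pvScan, hk, hy]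
    · have hOkk := hist k hlt
      cases hY : q12AltYear? wf (k : Int) with
      | none => rw [hY] at hOkk; simp at hOkk
      | some y =>
        have h20 : (y == "20") = false := by
          rw [hY] at hOkk
          cases hb : (y == "20")
          · rfl
          · exact absurd (by rw [show y = "20" from by simpa using hb]) hOkk.2
        simp only [pvScan, hk, if_pos, hY, h20, Bool.false_eq_true, if_false]
        exact ih (k + 1) i (by omega) hlt hi hist hy

-- under Pre_, every prefix of rows before the FIRST year-"20" row is valid and non-"20"
lemma hist_below_first (fl : Int) (wf : List (String × List (Int × String)))
    (hPre : Pre_q12 fl wf) (i0 : Nat) (hi0 : i0 < fl.toNat)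
    (hmin : ∀ m : Nat, m < i0 → q12AltYear? wf (m : Int) ≠ some "20") :
    pvHist wf i0 := by
  have hpos : (0 : Int) < fl := by omega
  have main : ∀ j : Nat, j ≤ i0 → pvHist wf j := by
    intro j
    induction j with
    | zero => intro _ m hm; omega
    | succ j ihj =>
      intro hj m hm
      rcases Nat.lt_succ_iff_lt_or_eq.mp hm with hm' | rfl
      · exact ihj (by omega) m hm'
      · refine ⟨pre_year fl wf hPre hpos m (by omega) (ihj (by omega)), hmin m (by omega)⟩
  exact main i0 le_rfl

-- ===== VERDICT (by name: the statement is the Claim_ definition above) =====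
theorem q12_spec : Claim_unchanged_q12 := by
  intro fl wf hDom hPre hD
  have h0 : pvHist wf 0 := by intro j hj; omega
  have hA := q12Loop_eq_scan fl wf hPre fl.toNat 0 0 0 (by omega) h0
  have hB := q12AltStop_eq_scan fl wf hPre fl.toNat 0 (by omega) h0
  have hC := pvScan_count fl wf fl.toNat 0
  simp only [Nat.cast_zero] at hA hB hC
  have hbonus :
      ((pvScan fl wf fl.toNat 0).2.2 && (q12AltLab? wf fl == some "+")) = false := by
    by_contra hcon
    have hb : (pvScan fl wf fl.toNat 0).2.2 = true ∧
        (q12AltLab? wf fl == some "+") = true := by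
      cases hS : (pvScan fl wf fl.toNat 0).2.2 <;>
        cases hl : (q12AltLab? wf fl == some "+") <;> simp [hS, hl] at hcon ⊢
    obtain ⟨i, hi, hy⟩ := pvScan_brk fl wf fl.toNat 0 h0 hb.1
    have hys : (q12AltYear? wf (i : Int)).isSome = true := by rw [hy]; rfl
    obtain ⟨p, hpmem, hpk⟩ := year_some_key wf (i : Int) hys
    refine hD ⟨⟨p, hpmem, by rw [hpk]; exact Int.natCast_nonneg i, by rw [hpk]; omega,
      by rw [hpk]; exact (year_eq20 wf (i : Int)).mp hy⟩, ?_⟩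
    rw [pvLab_eq]
    exact eq_of_beq hb.2
  rw [q12, q12_alt, hA, hB, hbonus]
  simp only [Bool.false_eq_true, if_false, add_zero]
  refine Prod.ext ?_ rfl
  show (0 : Int) + (pvScan fl wf fl.toNat 0).2.1 =
    (PySem.List.pyRange 0 (((pvScan fl wf fl.toNat 0).1 : Nat) : Int) 1).foldl
      (fun (acc : Int) j => if q12AltLab? wf j == some "+" then acc + 1 else acc) 0
  rw [← hC, PySem.List.pyRange_one_eq_nil le_rfl, List.foldl_nil]

theorem q12_changed : Claim_changed_q12 := by unfold Claim_changed_q12; decide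

theorem q12_tight : Claim_exact_q12 := by
  intro fl wf hDom hPre hD
  obtain ⟨⟨p, hpmem, hp0, hplt, hpyr⟩, hlab⟩ := hD
  rw [pvLab_eq] at hlab
  have hy : q12AltYear? wf ((p.1.toNat : Nat) : Int) = some "20" := by
    rw [show ((p.1.toNat : Nat) : Int) = p.1 by omega]
    exact (year_eq20 wf p.1).mpr hpyr
  have hP : ∃ n : Nat, n < fl.toNat ∧ q12AltYear? wf (n : Int) = some "20" :=
    ⟨p.1.toNat, by omega, hy⟩
  obtain ⟨hi0, hy0⟩ := Nat.find_spec hP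
  have hmin : ∀ m : Nat, m < Nat.find hP → q12AltYear? wf (m : Int) ≠ some "20" := by
    intro m hm hcon
    exact Nat.find_min hP hm ⟨by omega, hcon⟩
  have hhist0 := hist_below_first fl wf hPre (Nat.find hP) hi0 hmin
  have h0 : pvHist wf 0 := by intro j hj; omega
  have hA := q12Loop_eq_scan fl wf hPre fl.toNat 0 0 0 (by omega) h0
  have hB := q12AltStop_eq_scan fl wf hPre fl.toNat 0 (by omega) h0
  have hC := pvScan_count fl wf fl.toNat 0
  simp only [Nat.cast_zero] at hA hB hC
  have hbrk := pvScan_brk_of_year fl wf hPre fl.toNat 0 (Nat.find hP)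
    (by omega) (by omega) hi0 hhist0 hy0
  have hbeq : (q12AltLab? wf fl == some "+") = true := by rw [hlab]; rfl
  rw [q12, q12_alt, hA, hB, hbrk, hbeq]
  simp only [Bool.and_self, if_true]
  intro heq
  rw [Prod.mk.injEq] at heq
  obtain ⟨h1, -⟩ := heq
  have h2 : (0 : Int) + (pvScan fl wf fl.toNat 0).2.1 + 1 =
      (PySem.List.pyRange 0 (((pvScan fl wf fl.toNat 0).1 : Nat) : Int) 1).foldl
        (fun (acc : Int) j => if q12AltLab? wf j == some "+" then acc + 1 else acc) 0 := h1
  rw [← hC, PySem.List.pyRange_one_eq_nil le_rfl, List.foldl_nil] at h2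
  omega
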